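-- pv_equiv track=rewrite | github.com/yazug/container-processing | container_processing/lightblue.py | summarize_vulnerabilities
-- ===== SOURCE A (Python) =====
-- from collections import defaultdict
--
-- SEVERITIES = ('Critical', 'Important', 'Moderate', 'Low')
--
-- def summarize_vulnerabilities(cve_data):
--     """
--     Return a human-readable description of the most severe vulnerabilit(es).
--
--     Examples:
--       "an Important vulnerability"
--       "2 Critical vulnerabilities"
--     """
--     severity_counts = defaultdict(int)
--     if not cve_data:
--         return "No cve vulnerabilities found"
--
--     for cve in cve_data.values():
--         severity = cve['severity']
--         severity_counts[severity] += 1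
--     for severity in SEVERITIES:
--         if severity in severity_counts:
--             count = severity_counts[severity]
--             if count == 1:
--                 return 'an %s vulnerability' % severity
--             return '%d %s vulnerabilities' % (count, severity)
--     raise RuntimeError('could not describe severity in %s' % cve_data)
-- ===== SOURCE B (Python) =====
-- SEVERITIES = ('Critical', 'Important', 'Moderate', 'Low')
--
-- def summarize_vulnerabilities(cve_data):
--     """
--     Return a human-readable description of the most severe vulnerabilit(es).
--
--     Single pass over the values keeping the best (lowest) severity rank seen
--     and how many times it occurred, instead of counting everything first and
--     then scanning SEVERITIES.
--     """
--     if not cve_data: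
--         return "No cve vulnerabilities found"
--     rank = {s: i for i, s in enumerate(SEVERITIES)}
--     best = None
--     count = 0
--     for cve in cve_data.values():
--         r = rank.get(cve['severity'])
--         if r is None:
--             continue
--         if best is None or r < best:
--             best, count = r, 1
--         elif r == best:
--             count += 1
--     if best is None:
--         raise RuntimeError('could not describe severity in %s' % cve_data)
--     severity = SEVERITIES[best]
--     if count == 1:
--         return 'an %s vulnerability' % severity
--     return '%d %s vulnerabilities' % (count, severity)
-- ===== Notes on version B (the rewrite author's own statement) =====
-- stated objective: alternative
-- what changed: A counts all severities into a defaultdict and then scans SEVERITIES for the first one present; B makes a single pass over the values keeping only the best (lowest) severity rank seen so far and its multiplicity, then formats from that.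
import Mathlib
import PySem

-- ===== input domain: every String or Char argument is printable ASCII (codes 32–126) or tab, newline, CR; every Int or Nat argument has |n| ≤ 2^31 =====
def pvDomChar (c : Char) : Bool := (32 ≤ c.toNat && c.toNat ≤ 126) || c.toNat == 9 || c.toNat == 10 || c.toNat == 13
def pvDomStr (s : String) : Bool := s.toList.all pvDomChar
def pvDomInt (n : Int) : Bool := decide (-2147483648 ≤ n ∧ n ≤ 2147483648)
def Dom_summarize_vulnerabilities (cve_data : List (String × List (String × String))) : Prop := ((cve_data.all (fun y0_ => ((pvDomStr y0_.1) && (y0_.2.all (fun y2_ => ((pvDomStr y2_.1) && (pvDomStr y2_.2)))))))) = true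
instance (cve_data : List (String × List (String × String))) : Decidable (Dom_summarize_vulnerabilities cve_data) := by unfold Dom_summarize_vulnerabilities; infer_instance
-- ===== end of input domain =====

-- B replaces A's count-everything-then-scan-SEVERITIES decomposition by a single pass
-- keeping the best (lowest) severity rank and its multiplicity; same cost, different structure.

-- shared module constant SEVERITIES and the shared subexpression cve['severity'] over cve_data.values()
def pvSeverities : List String := ["Critical", "Important", "Moderate", "Low"]

-- cve['severity']; the `.getD ""` covers only the KeyError case, which Pre_ excludes
def pvSevOf (cve : List (String × String)) : String :=
  ((PySem.Dict.ofList cve).get? "severity").getD ""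

def pvSevList (cve_data : List (String × List (String × String))) : List String :=
  (PySem.Dict.ofList cve_data).values.map pvSevOf

-- ===== PORT A =====
def summarize_vulnerabilities (cve_data : List (String × List (String × String))) : String :=
  if cve_data = [] then "No cve vulnerabilities found"
  else
    -- severity_counts[severity] += 1 over the values (defaultdict loop = Counter)
    let counts := PySem.Dict.counter (pvSevList cve_data)
    -- for severity in SEVERITIES: if severity in severity_counts: return …
    match pvSeverities.find? (fun s => counts.contains s) with
    | some severity =>
        let count := counts.getD severity 0
        if count = 1 then "an " ++ severity ++ " vulnerability"
        else PySem.Int.toStr count ++ " " ++ severity ++ " vulnerabilities"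
    | none => ""   -- RuntimeError in Python; excluded by Pre_

-- ===== PORT B =====
def pvRank : PySem.Dict String Int :=
  PySem.Dict.ofList [("Critical", 0), ("Important", 1), ("Moderate", 2), ("Low", 3)]

-- one iteration of B's loop over (best, count)
def pvStep (st : Option Int × Int) (s : String) : Option Int × Int :=
  match pvRank.get? s with
  | none => st
  | some r =>
    match st.1 with
    | none => (some r, 1)
    | some b => if r < b then (some r, 1) else if r = b then (st.1, st.2 + 1) else st

def summarize_vulnerabilities_alt (cve_data : List (String × List (String × String))) : String :=
  if cve_data = [] then "No cve vulnerabilities found"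
  else
    let st := (pvSevList cve_data).foldl pvStep (none, 0)
    match st.1 with
    | none => ""   -- RuntimeError in Python; excluded by Pre_
    | some best =>
        let severity := PySem.List.pyGetD pvSeverities best ""
        if st.2 = 1 then "an " ++ severity ++ " vulnerability"
        else PySem.Int.toStr st.2 ++ " " ++ severity ++ " vulnerabilities"

-- ===== PRECONDITION & SPEC =====
-- Pre_ excludes exactly the inputs where A raises: a KeyError when some cve lacks a
-- 'severity' key, and a RuntimeError when cve_data is nonempty but no cve has a
-- severity listed in SEVERITIES.
def Pre_summarize_vulnerabilities (cve_data : List (String × List (String × String))) : Prop :=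
  cve_data = [] ∨
    ((∀ cve ∈ (PySem.Dict.ofList cve_data).values, ((PySem.Dict.ofList cve).get? "severity").isSome) ∧
     (∃ s ∈ pvSevList cve_data, s ∈ pvSeverities))
instance (cve_data : List (String × List (String × String))) : Decidable (Pre_summarize_vulnerabilities cve_data) := by unfold Pre_summarize_vulnerabilities; infer_instance

def pvWitness_summarize_vulnerabilities : (List (String × List (String × String))) :=
  [("CVE-1", [("severity", "Low")]), ("CVE-2", [("severity", "Moderate")])]

def Spec_summarize_vulnerabilities (cve_data : List (String × List (String × String))) (out : String) : Prop := out = summarize_vulnerabilities_alt cve_data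
instance (cve_data : List (String × List (String × String))) (out : String) : Decidable (Spec_summarize_vulnerabilities cve_data out) := by unfold Spec_summarize_vulnerabilities; infer_instance

-- ===== CLAIM (what is proved, stated in full; the proofs are below) =====
def Claim_equal_summarize_vulnerabilities : Prop := ∀ (cve_data : List (String × List (String × String))), Dom_summarize_vulnerabilities cve_data → Pre_summarize_vulnerabilities cve_data → Spec_summarize_vulnerabilities cve_data (summarize_vulnerabilities cve_data)

-- ===== LEMMAS AND PROOFS =====

-- total rank function: position in SEVERITIES, 4 for an unknown severity
def rk (s : String) : Int :=
  if s = "Critical" then 0 else if s = "Important" then 1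
  else if s = "Moderate" then 2 else if s = "Low" then 3 else 4

-- minimum rank occurring in a list of severities (4 when none is known)
def mr (l : List String) : Int := l.foldl (fun a s => min a (rk s)) 4

theorem rk_bounds (s : String) : 0 ≤ rk s ∧ rk s ≤ 4 := by
  unfold rk; split_ifs <;> omega

theorem rank_get (s : String) : pvRank.get? s = if rk s = 4 then none else some (rk s) := by
  unfold pvRank rk
  by_cases h0 : s = "Critical" <;> by_cases h1 : s = "Important" <;>
    by_cases h2 : s = "Moderate" <;> by_cases h3 : s = "Low" <;>
    simp_all [PySem.Dict.ofList, PySem.Dict.update, PySem.Dict.get?_insert, PySem.Dict.get?_empty]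

theorem mr_append (l : List String) (s : String) : mr (l ++ [s]) = min (mr l) (rk s) := by
  simp [mr, List.foldl_append]

theorem mr_bounds (l : List String) : 0 ≤ mr l ∧ mr l ≤ 4 := by
  induction l using List.reverseRecOn with
  | nil => simp [mr]
  | append_singleton l s ih =>
      rw [mr_append]
      have := rk_bounds s
      omega

theorem mr_le_of_mem (l : List String) (x : String) (hx : x ∈ l) : mr l ≤ rk x := by
  induction l using List.reverseRecOn with
  | nil => simp at hx
  | append_singleton l s ih =>
      rw [mr_append]
      rcases List.mem_append.mp hx with h | h
      · exact le_trans (min_le_left _ _) (ih h)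
      · simp at h; subst h; exact min_le_right _ _

theorem mr_attained (l : List String) (h : mr l ≠ 4) : ∃ x ∈ l, rk x = mr l := by
  induction l using List.reverseRecOn with
  | nil => simp [mr] at h
  | append_singleton l s ih =>
      rw [mr_append] at h ⊢
      by_cases hle : mr l ≤ rk s
      · rw [min_eq_left hle] at h ⊢
        obtain ⟨x, hx, hrk⟩ := ih h
        exact ⟨x, List.mem_append_left _ hx, hrk⟩
      · rw [min_eq_right (le_of_not_ge hle)] at *
        exact ⟨s, List.mem_append_right _ (by simp), rfl⟩

-- B's loop state after processing l
theorem foldl_inv (l : List String) :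
    l.foldl pvStep (none, 0) =
      (if mr l = 4 then none else some (mr l),
       if mr l = 4 then 0 else (l.countP (fun s => rk s == mr l) : Int)) := by
  induction l using List.reverseRecOn with
  | nil => simp [mr]
  | append_singleton l s ih =>
      have hb := mr_bounds l
      have hr := rk_bounds s
      rw [List.foldl_append, List.foldl_cons, List.foldl_nil, ih, mr_append]
      by_cases h4 : rk s = 4
      · have hmin : min (mr l) (rk s) = mr l := by omega
        rw [hmin]
        have hstep : pvStep
            (if mr l = 4 then none else some (mr l),
             if mr l = 4 then 0 else (l.countP (fun x => rk x == mr l) : Int)) s =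
            (if mr l = 4 then none else some (mr l),
             if mr l = 4 then 0 else (l.countP (fun x => rk x == mr l) : Int)) := by
          simp [pvStep, rank_get, h4]
        rw [hstep]
        by_cases hm : mr l = 4
        · rw [hm]; simp
        · have hc : (l ++ [s]).countP (fun x => rk x == mr l) = l.countP (fun x => rk x == mr l) := by
            rw [List.countP_append]
            simp [show ¬ (rk s = mr l) by omega]
          rw [hc]
      · by_cases hm : mr l = 4
        · have hmin : min (mr l) (rk s) = rk s := by omega
          rw [hmin]
          have hc : ((l ++ [s]).countP (fun x => rk x == rk s) : Nat) = 1 := by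
            rw [List.countP_append]
            have h0 : l.countP (fun x => rk x == rk s) = 0 := by
              rw [List.countP_eq_zero]
              intro x hx
              have := mr_le_of_mem l x hx
              simp only [beq_iff_eq]
              omega
            simp [h0]
          rw [hc, hm]
          simp [pvStep, rank_get, h4]
        · rcases lt_trichotomy (rk s) (mr l) with hlt | heq | hgt
          · have hmin : min (mr l) (rk s) = rk s := by omega
            rw [hmin]
            have hc : ((l ++ [s]).countP (fun x => rk x == rk s) : Nat) = 1 := by
              rw [List.countP_append]
              have h0 : l.countP (fun x => rk x == rk s) = 0 := by
                rw [List.countP_eq_zero]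
                intro x hx
                have := mr_le_of_mem l x hx
                simp only [beq_iff_eq]
                omega
              simp [h0]
            rw [hc]
            simp only [pvStep, rank_get, if_neg h4, if_neg hm]
            simp [hlt]
          · have hmin : min (mr l) (rk s) = mr l := by omega
            rw [hmin]
            have hc : ((l ++ [s]).countP (fun x => rk x == mr l) : Nat) =
                l.countP (fun x => rk x == mr l) + 1 := by
              rw [List.countP_append]
              simp [heq]
            rw [hc]
            simp only [pvStep, rank_get, if_neg h4, if_neg hm]
            simp [heq]
          · have hmin : min (mr l) (rk s) = mr l := by omega
            rw [hmin]
            have hc : (l ++ [s]).countP (fun x => rk x == mr l) = l.countP (fun x => rk x == mr l) := by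
              rw [List.countP_append]
              simp [show ¬ (rk s = mr l) by omega]
            rw [hc]
            simp only [pvStep, rank_get, if_neg h4, if_neg hm]
            simp [show ¬ rk s < mr l by omega, show ¬ rk s = mr l by omega]

theorem count_eq_countP (l : List String) (i : Int) (s : String)
    (hiff : ∀ x, rk x = i ↔ x = s) :
    l.countP (fun x => rk x == i) = l.count s := by
  rw [List.count]
  apply List.countP_congr
  intro x _
  simp only [beq_iff_eq]
  constructor
  · intro h; exact (hiff x).mp (by simpa using h)
  · intro h; simp_all

theorem rk_iff_0 (x : String) : rk x = 0 ↔ x = "Critical" := by unfold rk; split_ifs <;> simp_all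
theorem rk_iff_1 (x : String) : rk x = 1 ↔ x = "Important" := by unfold rk; split_ifs <;> simp_all
theorem rk_iff_2 (x : String) : rk x = 2 ↔ x = "Moderate" := by unfold rk; split_ifs <;> simp_all
theorem rk_iff_3 (x : String) : rk x = 3 ↔ x = "Low" := by unfold rk; split_ifs <;> simp_all

theorem mr_eq_of_mem_best (l : List String) (s : String) (i : Int) (hs : rk s = i)
    (hmem : s ∈ l) (hlow : ∀ j : Int, 0 ≤ j → j < i → ¬ ∃ x ∈ l, rk x = j) : mr l = i := by
  have h1 := mr_le_of_mem l s hmem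
  have h2 := mr_bounds l
  by_contra hne
  have hlt : mr l < i := by omega
  have hne4 : mr l ≠ 4 := by
    have := rk_bounds s; omega
  obtain ⟨x, hx, hrk⟩ := mr_attained l hne4
  exact hlow (mr l) (by omega) hlt ⟨x, hx, hrk⟩

-- the central fact: both reports, as functions of the severity list
theorem main_eq (l : List String) :
    (match pvSeverities.find? (fun s => (PySem.Dict.counter l).contains s) with
     | some severity =>
        let count := (PySem.Dict.counter l).getD severity 0
        if count = 1 then "an " ++ severity ++ " vulnerability"
        else PySem.Int.toStr count ++ " " ++ severity ++ " vulnerabilities"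
     | none => "") =
    (match (l.foldl pvStep (none, 0)).1 with
     | none => ""
     | some best =>
        let severity := PySem.List.pyGetD pvSeverities best ""
        if (l.foldl pvStep (none, 0)).2 = 1 then "an " ++ severity ++ " vulnerability"
        else PySem.Int.toStr (l.foldl pvStep (none, 0)).2 ++ " " ++ severity ++ " vulnerabilities") := by
  rw [foldl_inv]
  have hcont : ∀ s : String, (PySem.Dict.counter l).contains s = decide (s ∈ l) := by
    intro s; simp [pysem]
  by_cases hC : "Critical" ∈ l
  · have hmr : mr l = 0 := mr_eq_of_mem_best l "Critical" 0 (by decide) hC (by intro j hj hjlt; omega)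
    have hfind : pvSeverities.find? (fun s => (PySem.Dict.counter l).contains s) = some "Critical" := by
      simp [pvSeverities, hcont, hC]
    rw [hfind, hmr]
    have hcnt : l.countP (fun x => rk x == (0:Int)) = l.count "Critical" :=
      count_eq_countP l 0 "Critical" rk_iff_0
    simp [PySem.Dict.getD_counter, hcnt, PySem.List.pyGetD, pvSeverities]
  · by_cases hI : "Important" ∈ l
    · have hmr : mr l = 1 := mr_eq_of_mem_best l "Important" 1 (by decide) hI (by
        intro j hj hjlt h
        obtain ⟨x, hx, hrk⟩ := h
        have : j = 0 := by omega
        subst this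
        exact hC (((rk_iff_0 x).mp hrk) ▸ hx))
      have hfind : pvSeverities.find? (fun s => (PySem.Dict.counter l).contains s) = some "Important" := by
        simp [pvSeverities, List.find?, hcont, hC, hI]
      rw [hfind, hmr]
      have hcnt : l.countP (fun x => rk x == (1:Int)) = l.count "Important" :=
        count_eq_countP l 1 "Important" rk_iff_1
      simp [PySem.Dict.getD_counter, hcnt, PySem.List.pyGetD, pvSeverities]
    · by_cases hM : "Moderate" ∈ l
      · have hmr : mr l = 2 := mr_eq_of_mem_best l "Moderate" 2 (by decide) hM (by
          intro j hj hjlt h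
          obtain ⟨x, hx, hrk⟩ := h
          interval_cases j
          · exact hC (((rk_iff_0 x).mp hrk) ▸ hx)
          · exact hI (((rk_iff_1 x).mp hrk) ▸ hx))
        have hfind : pvSeverities.find? (fun s => (PySem.Dict.counter l).contains s) = some "Moderate" := by
          simp [pvSeverities, List.find?, hcont, hC, hI, hM]
        rw [hfind, hmr]
        have hcnt : l.countP (fun x => rk x == (2:Int)) = l.count "Moderate" :=
          count_eq_countP l 2 "Moderate" rk_iff_2
        simp [PySem.Dict.getD_counter, hcnt, PySem.List.pyGetD, pvSeverities]
      · by_cases hL : "Low" ∈ l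
        · have hmr : mr l = 3 := mr_eq_of_mem_best l "Low" 3 (by decide) hL (by
            intro j hj hjlt h
            obtain ⟨x, hx, hrk⟩ := h
            interval_cases j
            · exact hC (((rk_iff_0 x).mp hrk) ▸ hx)
            · exact hI (((rk_iff_1 x).mp hrk) ▸ hx)
            · exact hM (((rk_iff_2 x).mp hrk) ▸ hx))
          have hfind : pvSeverities.find? (fun s => (PySem.Dict.counter l).contains s) = some "Low" := by
            simp [pvSeverities, List.find?, hcont, hC, hI, hM, hL]
          rw [hfind, hmr]
          have hcnt : l.countP (fun x => rk x == (3:Int)) = l.count "Low" :=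
            count_eq_countP l 3 "Low" rk_iff_3
          simp [PySem.Dict.getD_counter, hcnt, PySem.List.pyGetD, pvSeverities]
        · have hmr : mr l = 4 := by
            by_contra h
            obtain ⟨x, hx, hrk⟩ := mr_attained l h
            have hb := mr_bounds l
            have hcases : rk x = 0 ∨ rk x = 1 ∨ rk x = 2 ∨ rk x = 3 := by omega
            rcases hcases with h0 | h1 | h2 | h3
            · exact hC (((rk_iff_0 x).mp h0) ▸ hx)
            · exact hI (((rk_iff_1 x).mp h1) ▸ hx)
            · exact hM (((rk_iff_2 x).mp h2) ▸ hx)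
            · exact hL (((rk_iff_3 x).mp h3) ▸ hx)
          have hfind : pvSeverities.find? (fun s => (PySem.Dict.counter l).contains s) = none := by
            simp [pvSeverities, List.find?, hcont, hC, hI, hM, hL]
          rw [hfind, hmr]
          simp

-- ===== VERDICT (by name: the statement is the Claim_ definition above) =====
theorem summarize_vulnerabilities_spec : Claim_equal_summarize_vulnerabilities := by
  intro cve_data _ _
  unfold Spec_summarize_vulnerabilities summarize_vulnerabilities summarize_vulnerabilities_alt
  by_cases h : cve_data = []
  · simp [h]
  · simp only [if_neg h]
    exact main_eq (pvSevList cve_data)
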